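-- pv_equiv track=rewrite | github.com/raiymbek2048/phantom | backend/app/modules/vuln_confirmer.py | _escalate_severity
-- ===== SOURCE A (Python) =====
-- def _escalate_severity(extracted_data: dict) -> str:
--     """Determine severity based on what confirmation proved.
--
--     Rules:
--     - Can read local files -> HIGH
--     - Can read credentials -> CRITICAL
--     - Can execute commands -> CRITICAL
--     - Can access internal services -> HIGH
--     - Can access other users' data -> HIGH
--     - Can read DB data via UNION -> CRITICAL (full data read)
--     - Can read DB version via blind -> HIGH
--     """
--     # Check for credential access
--     credential_indicators = [
--         "iam_leak", "AccessKeyId", "SecretAccessKey", "service_account_token",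
--         "managed_identity_token", "ssh_key", "aws_creds_file", "shadow_hashes",
--         "env_secrets", "passwd_read",
--     ]
--     for indicator in credential_indicators:
--         if extracted_data.get(indicator):
--             return "critical"
--
--     # Check for command execution
--     if extracted_data.get("can_write_files") or extracted_data.get("reverse_shell_templates"):
--         return "critical"
--     if extracted_data.get("whoami") or extracted_data.get("uid"):
--         return "critical"
--
--     # Check for full DB read (UNION-based)
--     if extracted_data.get("column_count") and extracted_data.get("db_version"):
--         return "critical"
--
--     # Check for internal service access
--     if extracted_data.get("internal_services"):
--         return "high"
--     if extracted_data.get("service"):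
--         return "high"
--
--     # Check for file read
--     if extracted_data.get("file_read") or extracted_data.get("users"):
--         return "high"
--
--     # Check for other users' data
--     if extracted_data.get("records_accessed"):
--         return "high"
--
--     # Default to high for confirmed vulns
--     return "high"
-- ===== SOURCE B (Python) =====
-- # B: one pass over the dict's items with three accumulator flags (data-driven scan),
-- # instead of A's ordered chain of key lookups; default "high". (alternative)
-- _CRITICAL_KEYS = frozenset({
--     "iam_leak", "AccessKeyId", "SecretAccessKey", "service_account_token",
--     "managed_identity_token", "ssh_key", "aws_creds_file", "shadow_hashes",
--     "env_secrets", "passwd_read",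
--     "can_write_files", "reverse_shell_templates", "whoami", "uid",
-- })
--
-- def _escalate_severity(extracted_data: dict) -> str:
--     found_critical = False
--     has_column_count = False
--     has_db_version = False
--     for key, value in extracted_data.items():
--         if not value:
--             continue
--         if key == "column_count":
--             has_column_count = True
--         elif key == "db_version":
--             has_db_version = True
--         elif key in _CRITICAL_KEYS:
--             found_critical = True
--     if found_critical or (has_column_count and has_db_version):
--         return "critical"
--     return "high"
-- ===== Notes on version B (the rewrite author's own statement) =====
-- stated objective: alternative
-- what changed: B replaces A's ordered chain of ~16 dict lookups keyed by known flag names with a single data-driven pass over the dict's items, classifying each present truthy key into three accumulator flags (critical-set member, column_count, db_version) and deciding the severity once at the end.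
import Mathlib
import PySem

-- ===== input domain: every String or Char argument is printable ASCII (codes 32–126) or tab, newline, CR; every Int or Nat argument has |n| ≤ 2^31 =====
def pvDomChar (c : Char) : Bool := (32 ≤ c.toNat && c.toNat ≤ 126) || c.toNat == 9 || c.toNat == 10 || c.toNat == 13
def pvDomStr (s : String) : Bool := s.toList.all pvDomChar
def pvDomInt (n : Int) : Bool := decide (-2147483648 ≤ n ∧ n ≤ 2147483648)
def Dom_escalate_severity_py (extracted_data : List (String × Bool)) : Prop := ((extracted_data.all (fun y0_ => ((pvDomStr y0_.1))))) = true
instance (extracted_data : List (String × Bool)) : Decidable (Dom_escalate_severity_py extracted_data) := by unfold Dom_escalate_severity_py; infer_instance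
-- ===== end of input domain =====

-- B replaces A's ordered chain of key lookups with a single data-driven pass over the
-- dict's items, accumulating three flags and deciding the severity once at the end.

-- extracted_data.get(k) truthiness: first matching value, or False if absent
def pvGetB (d : List (String × Bool)) (k : String) : Bool :=
  (PySem.Dict.getD (PySem.Dict.mk d) k false)

-- ===== PORT A =====
-- the for-loop over credential_indicators; an early return yields "critical",
-- falling off the loop continues with the rest of the function (pvAfterLoop)
def pvAfterLoop (d : List (String × Bool)) : String :=
  if pvGetB d "can_write_files" || pvGetB d "reverse_shell_templates" then "critical"
  else if pvGetB d "whoami" || pvGetB d "uid" then "critical"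
  else if pvGetB d "column_count" && pvGetB d "db_version" then "critical"
  else if pvGetB d "internal_services" then "high"
  else if pvGetB d "service" then "high"
  else if pvGetB d "file_read" || pvGetB d "users" then "high"
  else if pvGetB d "records_accessed" then "high"
  else "high"

def pvCredLoop (d : List (String × Bool)) : List String → String
  | [] => pvAfterLoop d
  | k :: ks => if pvGetB d k then "critical" else pvCredLoop d ks

def escalate_severity_py (extracted_data : List (String × Bool)) : String :=
  pvCredLoop extracted_data
    ["iam_leak", "AccessKeyId", "SecretAccessKey", "service_account_token",
     "managed_identity_token", "ssh_key", "aws_creds_file", "shadow_hashes",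
     "env_secrets", "passwd_read"]

-- ===== PORT B =====
def pvCriticalKeys : List String :=
  ["iam_leak", "AccessKeyId", "SecretAccessKey", "service_account_token",
   "managed_identity_token", "ssh_key", "aws_creds_file", "shadow_hashes",
   "env_secrets", "passwd_read",
   "can_write_files", "reverse_shell_templates", "whoami", "uid"]

-- B's loop body: state = (found_critical, has_column_count, has_db_version)
def pvStep (st : Bool × Bool × Bool) (p : String × Bool) : Bool × Bool × Bool :=
  if !p.2 then st
  else if p.1 == "column_count" then (st.1, true, st.2.2)
  else if p.1 == "db_version" then (st.1, st.2.1, true)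
  else if pvCriticalKeys.contains p.1 then (true, st.2.1, st.2.2)
  else st

def escalate_severity_py_alt (extracted_data : List (String × Bool)) : String :=
  let st := extracted_data.foldl pvStep (false, false, false)
  if st.1 || (st.2.1 && st.2.2) then "critical" else "high"

-- ===== PRECONDITION & SPEC =====
-- Pre_ excludes association lists with duplicate keys: they cannot arise from a Python
-- dict (both programs take a dict), and on them A's first-match lookup vs B's full scan
-- are both accidental readings of the representation.
def Pre_escalate_severity_py (extracted_data : List (String × Bool)) : Prop :=
  (extracted_data.map Prod.fst).Nodup
instance (extracted_data : List (String × Bool)) : Decidable (Pre_escalate_severity_py extracted_data) := by unfold Pre_escalate_severity_py; infer_instance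
def pvWitness_escalate_severity_py : (List (String × Bool)) := [("whoami", true), ("service", false)]

def Spec_escalate_severity_py (extracted_data : List (String × Bool)) (out : String) : Prop := out = escalate_severity_py_alt extracted_data
instance (extracted_data : List (String × Bool)) (out : String) : Decidable (Spec_escalate_severity_py extracted_data out) := by unfold Spec_escalate_severity_py; infer_instance

-- ===== CLAIM (what is proved, stated in full; the proofs are below) =====
def Claim_equal_escalate_severity_py : Prop := ∀ (extracted_data : List (String × Bool)), Dom_escalate_severity_py extracted_data → Pre_escalate_severity_py extracted_data → Spec_escalate_severity_py extracted_data (escalate_severity_py extracted_data)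

-- ===== LEMMAS AND PROOFS =====

-- first-match lookup = any-scan, when keys are unique
lemma pvGetB_eq_any (d : List (String × Bool)) (k : String)
    (h : (d.map Prod.fst).Nodup) :
    pvGetB d k = d.any (fun p => p.1 == k && p.2) := by
  induction d with
  | nil => rfl
  | cons p t ih =>
    obtain ⟨k0, v0⟩ := p
    simp only [List.map_cons, List.nodup_cons] at h
    simp only [pvGetB, PySem.Dict.getD_eq_get?_getD, PySem.Dict.get?_mk_cons, List.any_cons]
    by_cases hk : k0 = k
    · subst hk
      have ht : t.any (fun q => q.1 == k0 && q.2) = false := by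
        simp only [List.any_eq_false]
        intro q hq
        have : q.1 ≠ k0 := fun e => h.1 (e ▸ List.mem_map_of_mem hq)
        simp [this]
      simp [ht]
    · have := ih h.2
      simp only [pvGetB, PySem.Dict.getD_eq_get?_getD] at this
      simp [hk, this]

-- characterization of B's fold
lemma pvScan_spec (d : List (String × Bool)) (a b c : Bool) :
    d.foldl pvStep (a, b, c) =
      (a || d.any (fun p => !(p.1 == "column_count") && !(p.1 == "db_version") && pvCriticalKeys.contains p.1 && p.2),
       b || d.any (fun p => p.1 == "column_count" && p.2),
       c || d.any (fun p => p.1 == "db_version" && p.2)) := by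
  induction d generalizing a b c with
  | nil => simp
  | cons p t ih =>
    simp only [List.foldl_cons, List.any_cons]
    cases hv : p.2 with
    | false =>
      simp only [pvStep, hv, Bool.not_false, ih]
      simp
    | true =>
      by_cases h1 : p.1 = "column_count"
      · simp [pvStep, hv, h1, ih]
      · by_cases h2 : p.1 = "db_version"
        · simp [pvStep, hv, h2, ih]
        · have hb1 : (p.1 == "column_count") = false := by simp [h1]
          have hb2 : (p.1 == "db_version") = false := by simp [h2]
          by_cases h3 : p.1 ∈ pvCriticalKeys
          · simp [pvStep, hv, hb1, hb2, h3, ih]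
          · simp [pvStep, hv, hb1, hb2, h3, ih]

-- the critical-scan over the data equals the key-driven any over the 14 keys
lemma pvCrit_any (d : List (String × Bool)) (h : (d.map Prod.fst).Nodup) :
    d.any (fun p => !(p.1 == "column_count") && !(p.1 == "db_version") && pvCriticalKeys.contains p.1 && p.2)
      = pvCriticalKeys.any (fun k => pvGetB d k) := by
  have hcc : ¬ ("column_count" ∈ pvCriticalKeys) := by decide
  have hdb : ¬ ("db_version" ∈ pvCriticalKeys) := by decide
  rw [Bool.eq_iff_iff]
  simp only [List.any_eq_true]
  constructor
  · rintro ⟨p, hp, hpred⟩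
    simp only [Bool.and_eq_true, Bool.not_eq_true', beq_eq_false_iff_ne, List.contains_eq_mem,
      decide_eq_true_eq] at hpred
    refine ⟨p.1, hpred.1.2, ?_⟩
    rw [pvGetB_eq_any d p.1 h]
    simp only [List.any_eq_true]
    exact ⟨p, hp, by simp [hpred.2]⟩
  · rintro ⟨k, hk, hget⟩
    rw [pvGetB_eq_any d k h] at hget
    simp only [List.any_eq_true, Bool.and_eq_true, beq_iff_eq] at hget
    obtain ⟨p, hp, hk1, hv⟩ := hget
    refine ⟨p, hp, ?_⟩
    have h1 : p.1 ≠ "column_count" := by rintro e; exact hcc (by rw [← e, hk1]; exact hk)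
    have h2 : p.1 ≠ "db_version" := by rintro e; exact hdb (by rw [← e, hk1]; exact hk)
    simp [h1, h2, hv, List.contains_eq_mem, hk1 ▸ hk]

-- A equals the canonical two-test form
lemma pvA_canonical (d : List (String × Bool)) :
    escalate_severity_py d =
      (if pvCriticalKeys.any (fun k => pvGetB d k)
          || (pvGetB d "column_count" && pvGetB d "db_version")
       then "critical" else "high") := by
  unfold escalate_severity_py pvCriticalKeys
  simp only [pvCredLoop, pvAfterLoop, List.any_cons, List.any_nil]
  by_cases h0 : pvGetB d "iam_leak" = true
  · simp [*]
  simp only [Bool.not_eq_true] at h0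
  by_cases h1 : pvGetB d "AccessKeyId" = true
  · simp [*]
  simp only [Bool.not_eq_true] at h1
  by_cases h2 : pvGetB d "SecretAccessKey" = true
  · simp [*]
  simp only [Bool.not_eq_true] at h2
  by_cases h3 : pvGetB d "service_account_token" = true
  · simp [*]
  simp only [Bool.not_eq_true] at h3
  by_cases h4 : pvGetB d "managed_identity_token" = true
  · simp [*]
  simp only [Bool.not_eq_true] at h4
  by_cases h5 : pvGetB d "ssh_key" = true
  · simp [*]
  simp only [Bool.not_eq_true] at h5
  by_cases h6 : pvGetB d "aws_creds_file" = true
  · simp [*]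
  simp only [Bool.not_eq_true] at h6
  by_cases h7 : pvGetB d "shadow_hashes" = true
  · simp [*]
  simp only [Bool.not_eq_true] at h7
  by_cases h8 : pvGetB d "env_secrets" = true
  · simp [*]
  simp only [Bool.not_eq_true] at h8
  by_cases h9 : pvGetB d "passwd_read" = true
  · simp [*]
  simp only [Bool.not_eq_true] at h9
  by_cases h10 : pvGetB d "can_write_files" = true
  · simp [*]
  simp only [Bool.not_eq_true] at h10
  by_cases h11 : pvGetB d "reverse_shell_templates" = true
  · simp [*]
  simp only [Bool.not_eq_true] at h11
  by_cases h12 : pvGetB d "whoami" = true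
  · simp [*]
  simp only [Bool.not_eq_true] at h12
  by_cases h13 : pvGetB d "uid" = true
  · simp [*]
  simp only [Bool.not_eq_true] at h13
  simp [*]

-- ===== VERDICT (by name: the statement is the Claim_ definition above) =====
theorem escalate_severity_py_spec : Claim_equal_escalate_severity_py := by
  intro d _ hpre
  unfold Spec_escalate_severity_py escalate_severity_py_alt
  rw [pvA_canonical d]
  simp only [pvScan_spec d false false false, Bool.false_or]
  rw [pvCrit_any d hpre,
      ← pvGetB_eq_any d "column_count" hpre, ← pvGetB_eq_any d "db_version" hpre]
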